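-- pv_equiv track=rewrite | github.com/CrySamuel/Recursao | Exercise 3/Exercise3.py | pertence_a_T
-- ===== SOURCE A (Python) =====
-- def pertence_a_T(n):
--     if n == 2:
--         return True
--
--     if n > 2 and n % 2 == 1:
--         return pertence_a_T(n - 3)
--
--     if n > 2 and n % 2 == 0:
--         return pertence_a_T(n // 2)
--
--     return False
-- ===== SOURCE B (Python) =====
-- def pertence_a_T(n):
--     # Closed form: T = { n : n >= 2 and n % 3 != 0 }.
--     # Each reduction (odd: n-3, even: n//2) preserves divisibility by 3,
--     # so the recursion succeeds exactly on integers >= 2 not divisible by 3.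
--     return n >= 2 and n % 3 != 0
-- ===== Notes on version B (the rewrite author's own statement) =====
-- stated objective: simpler
-- what changed: Replaced the recursive reduction (subtract 3 when odd, halve when even) by the closed-form membership test n >= 2 and n % 3 != 0, which the recursion provably decides.
import Mathlib
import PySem

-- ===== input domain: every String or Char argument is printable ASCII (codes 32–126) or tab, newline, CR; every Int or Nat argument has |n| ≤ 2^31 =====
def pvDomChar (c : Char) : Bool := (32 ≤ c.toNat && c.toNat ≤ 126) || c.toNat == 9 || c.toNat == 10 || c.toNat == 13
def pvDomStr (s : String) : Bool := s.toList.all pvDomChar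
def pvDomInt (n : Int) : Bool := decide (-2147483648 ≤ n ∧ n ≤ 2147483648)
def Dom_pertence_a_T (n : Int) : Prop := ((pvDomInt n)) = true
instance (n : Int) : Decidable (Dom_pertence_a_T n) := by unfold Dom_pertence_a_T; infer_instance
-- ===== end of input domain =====

-- B replaces the recursive membership test by its closed form (n >= 2 and n % 3 != 0): simpler, a single arithmetic test instead of a recursion.


-- ===== PORT A =====
def pertence_a_T (n : Int) : Bool :=
  if n == 2 then true
  else if n > 2 && PySem.Int.mod n 2 == 1 then pertence_a_T (n - 3)
  else if n > 2 && PySem.Int.mod n 2 == 0 then pertence_a_T (PySem.Int.floordiv n 2)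
  else false
termination_by n.toNat
decreasing_by
  · simp only [beq_iff_eq, Bool.and_eq_true, decide_eq_true_eq] at *; omega
  · rename_i h1 h2
    simp only [beq_iff_eq, Bool.and_eq_true, decide_eq_true_eq] at h2
    rw [PySem.Int.floordiv_eq_ediv_of_pos (by omega)]
    omega

-- ===== PORT B =====
-- closed form: n ∈ T ↔ n ≥ 2 ∧ n % 3 ≠ 0
def pertence_a_T_alt (n : Int) : Bool :=
  n ≥ 2 && PySem.Int.mod n 3 != 0

-- ===== PRECONDITION & SPEC =====
def Spec_pertence_a_T (n : Int) (out : Bool) : Prop := out = pertence_a_T_alt n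
instance (n : Int) (out : Bool) : Decidable (Spec_pertence_a_T n out) := by unfold Spec_pertence_a_T; infer_instance

-- ===== CLAIM (what is proved, stated in full; the proofs are below) =====
def Claim_equal_pertence_a_T : Prop := ∀ (n : Int), Dom_pertence_a_T n → Spec_pertence_a_T n (pertence_a_T n)

-- ===== LEMMAS AND PROOFS =====
-- (the proof proceeds by the functional induction of the A-port)

-- ===== VERDICT (by name: the statement is the Claim_ definition above) =====
-- evaluated form of the B-port, used by every induction case
theorem alt_eq (n : Int) : pertence_a_T_alt n = decide (2 ≤ n ∧ n % 3 ≠ 0) := by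
  rw [show pertence_a_T_alt n = (decide (n ≥ 2) && PySem.Int.mod n 3 != 0) from rfl,
    PySem.Int.mod_eq_emod_of_pos (show (0:Int) < 3 by omega)]
  by_cases h1 : 2 ≤ n <;> by_cases h2 : n % 3 = 0 <;> simp [h1, h2]

theorem agree (n : Int) : pertence_a_T n = pertence_a_T_alt n := by
  induction n using pertence_a_T.induct with
  | case1 n h =>
    rw [pertence_a_T]
    simp only [beq_iff_eq] at h
    simp [pertence_a_T_alt, h, PySem.Int.mod]
  | case2 n h1 h2 ih =>
    rw [pertence_a_T, if_neg h1, if_pos h2, ih, alt_eq, alt_eq]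
    simp only [beq_iff_eq, Bool.and_eq_true, decide_eq_true_eq] at h2
    rw [PySem.Int.mod_eq_emod_of_pos (show (0:Int) < 2 by omega)] at h2
    rw [decide_eq_decide]
    omega
  | case3 n h1 h2 h3 ih =>
    rw [pertence_a_T, if_neg h1, if_neg h2, if_pos h3, ih,
      PySem.Int.floordiv_eq_ediv_of_pos (show (0:Int) < 2 by omega), alt_eq, alt_eq]
    simp only [beq_iff_eq, Bool.and_eq_true, decide_eq_true_eq] at h3
    rw [PySem.Int.mod_eq_emod_of_pos (show (0:Int) < 2 by omega)] at h3
    rw [decide_eq_decide]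
    obtain ⟨m, hm⟩ : ∃ m, n = 2 * m := ⟨n / 2, by omega⟩
    subst hm
    omega
  | case4 n h1 h2 h3 =>
    rw [pertence_a_T, if_neg h1, if_neg h2, if_neg h3, alt_eq]
    simp only [beq_iff_eq, Bool.and_eq_true, decide_eq_true_eq, not_and] at h1 h2 h3
    rw [PySem.Int.mod_eq_emod_of_pos (show (0:Int) < 2 by omega)] at h2 h3
    symm
    simp only [decide_eq_false_iff_not]
    omega

theorem pertence_a_T_spec : Claim_equal_pertence_a_T :=
  fun n _ => agree n
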